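-- pv_equiv track=rewrite | github.com/comscope/ComDMFT | bin/toldiff_tokens.py | line2strlist
-- ===== SOURCE A (Python) =====
-- def line2strlist(l,separators):
--     """
--     This routine breaks a line stored in l up and produces a list of
--     strings.
--     """
--     #separators = ["=","(",")","{","}","[","]",",","*","%",":",";"]
--     a = l.split()
--     if len(a) == 0:
--        #
--        # We have found a blank line. Introduce a special token to cope with
--        # this. If this token is not introduced it is impossible to say whether
--        # blank lines match or not. As a result the diffs would change
--        # significantly.
--        #
--        # In practice we cannot add a dummy token as it leads to unexpected
--        # results. For example if we delete a line just before a white space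
--        # line the diff procedure will match the newline token from the deleted
--        # line up with the newline token of the remain whitespace line. As a
--        # result deleting a single line will appear in the output as a change
--        # on 2 lines. Clearly this is very confusing.
--        #
--        # The alternative of adding dummy tokens on white space lines only
--        # turns out to lead to strange results as well. In particular because
--        # it is then not clear whether a line with a single token contains
--        # the dummy token or it is just a normal line with a single token on.
--        #
--        # So ultimately these dummy tokens only cause problems. Therefore they
--        # have to be avoided and the whitespace lines have to be dealt with in
--        # the token-to-line snake list conversion somehow.
--        #
--        #a = ["#newline#"]
--        pass
--     else:
--        nseps = len(separators)
--        isep  = 0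
--        while (isep < nseps):
--           sep = separators[isep]
--           b = []
--           while (len(a) > 0):
--              tmp = a.pop(0)
--              n = tmp.count(sep)
--              elm3 = tmp
--              while n > 0:
--                 (elm1,elm2,elm3) = tmp.partition(sep)
--                 if elm1 != "":
--                    b.append(elm1)
--                 if elm2 != "":
--                    b.append(elm2)
--                 tmp = elm3
--                 n = n - 1
--              if elm3 != "":
--                 b.append(elm3)
--           a = b
--           isep = isep + 1
--        # Do not do dummy tokens, see above.
--        #a.append("#newline#")
--     return a
-- ===== SOURCE B (Python) =====
-- def line2strlist(l, separators):
--     """Break line l into tokens: split on whitespace, then split each token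
--     on every separator in turn, keeping the separators as tokens.
--
--     Tokens never contain whitespace, so a separator pass is just a C-level
--     replace of the separator by ' <sep> ' on the whole line (a separator
--     containing whitespace can never occur inside a token, so that pass is a
--     no-op and is skipped); one final split() yields the tokens."""
--     for sep in separators:
--         if sep and not any(c.isspace() for c in sep):
--             l = l.replace(sep, " " + sep + " ")
--     return l.split()
-- ===== Notes on version B (the rewrite author's own statement) =====
-- stated objective: faster
-- what changed: B replaces A's per-token pop(0) queue with count + n repeated str.partition scans per separator by a single C-level l.replace(sep, ' '+sep+' ') per separator on the whole line (tokens never contain whitespace, so whitespace-containing separators are no-op passes and are skipped), followed by one final l.split().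
-- outside the precondition, e.g. on line2strlist('a b', ['']): A raises ValueError, B returns ['a', 'b']
import Mathlib
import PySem

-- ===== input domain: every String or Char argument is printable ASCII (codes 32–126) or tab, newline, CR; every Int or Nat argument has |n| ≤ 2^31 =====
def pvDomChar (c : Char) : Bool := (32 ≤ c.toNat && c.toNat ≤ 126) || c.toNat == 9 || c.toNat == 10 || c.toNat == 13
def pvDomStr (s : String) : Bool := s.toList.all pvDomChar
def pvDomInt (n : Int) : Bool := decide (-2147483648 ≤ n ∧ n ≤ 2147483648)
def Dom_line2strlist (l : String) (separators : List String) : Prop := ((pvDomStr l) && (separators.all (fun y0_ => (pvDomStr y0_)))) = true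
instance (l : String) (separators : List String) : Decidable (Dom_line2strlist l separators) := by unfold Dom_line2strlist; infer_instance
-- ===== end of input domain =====

-- B replaces A's per-token pop(0)/count/partition loops by one whole-line
-- str.replace(sep, ' '+sep+' ') per separator and a final split() (objective: faster, see claim).

-- ===== PORT A =====
-- hand port of tmp.partition(sep) for sep ≠ "": first occurrence via find, slices around it (exact there)
def pvPartA (sep tmp : List Char) : List Char × List Char × List Char :=
  let i := PySem.Chars.find tmp sep
  if i < 0 then (tmp, [], [])
  else (tmp.take i.toNat, sep, tmp.drop (i.toNat + sep.length))

-- A's inner 'while n > 0' loop over one token; at n = 0 the trailing 'if elm3 != ""' append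
def pvInnerA (sep : List Char) : List Char → Nat → List (List Char) → List (List Char)
  | tmp, 0, b => if tmp ≠ [] then b ++ [tmp] else b
  | tmp, Nat.succ n, b =>
      let e := pvPartA sep tmp
      let b1 := if e.1 ≠ [] then b ++ [e.1] else b
      let b2 := if e.2.1 ≠ [] then b1 ++ [e.2.1] else b1
      pvInnerA sep e.2.2 n b2

def line2strlist (l : String) (separators : List String) : List String :=
  let a := PySem.Chars.split₀ l.toList
  if a = [] then []
  else
    ((separators.foldl (fun a sep =>
        a.foldl (fun b tmp => pvInnerA sep.toList tmp (PySem.Chars.count tmp sep.toList) b) []) a).map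
      fun cs => String.mk cs)

-- ===== PORT B =====
-- guard 'sep and not any(c.isspace() for c in sep)', then l = l.replace(sep, " "+sep+" "); final l.split()
def line2strlist_alt (l : String) (separators : List String) : List String :=
  ((PySem.Chars.split₀
      (separators.foldl (fun s sep =>
        if sep.toList ≠ [] ∧ sep.toList.any PySem.Chars.isspace = false
        then PySem.Chars.replace s sep.toList (' ' :: (sep.toList ++ [' ']))
        else s) l.toList)).map
    fun cs => String.mk cs)

-- ===== PRECONDITION & SPEC =====
-- Pre_ excludes only inputs where A raises: on a non-blank line an empty separator makes
-- tmp.partition("") raise ValueError (B's guard skips empty separators and returns the tokens).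
def Pre_line2strlist (l : String) (separators : List String) : Prop :=
  PySem.Str.split₀ l ≠ [] → ∀ s ∈ separators, s ≠ ""
instance (l : String) (separators : List String) : Decidable (Pre_line2strlist l separators) := by unfold Pre_line2strlist; infer_instance
def pvWitness_line2strlist : String × List String := ("x=f(a,b)", ["=", "(", ")", ","])

def Spec_line2strlist (l : String) (separators : List String) (out : List String) : Prop := out = line2strlist_alt l separators
instance (l : String) (separators : List String) (out : List String) : Decidable (Spec_line2strlist l separators out) := by unfold Spec_line2strlist; infer_instance

-- ===== CLAIM (what is proved, stated in full; the proofs are below) =====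
def Claim_equal_line2strlist : Prop := ∀ (l : String) (separators : List String), Dom_line2strlist l separators → Pre_line2strlist l separators → Spec_line2strlist l separators (line2strlist l separators)

-- ===== LEMMAS AND PROOFS =====

-- proof-side bridge: per-token result of one separator pass (first piece if nonempty,
-- then sep before each later nonempty piece)
def pvBurst (sep t : List Char) : List (List Char) :=
  match PySem.Chars.splitOn t sep with
  | [] => []
  | p0 :: rest =>
      rest.foldl (fun out p => (out ++ [sep]) ++ (if p ≠ [] then [p] else []))
        (if p0 ≠ [] then [p0] else [])

-- reference splitter: Python t.split(sep) for sep = s0 :: st, by structural scan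
def pvSos (s0 : Char) (st : List Char) : List Char → List (List Char)
  | [] => [[]]
  | c :: rest =>
      if (s0 :: st).isPrefixOf (c :: rest) then [] :: pvSos s0 st (rest.drop st.length)
      else (pvSos s0 st rest).modifyHead (c :: ·)
  termination_by l => l.length
  decreasing_by
    all_goals simp

theorem pvSos_ne_nil (s0 : Char) (st l : List Char) : pvSos s0 st l ≠ [] := by
  cases l with
  | nil => simp [pvSos]
  | cons c rest =>
      rw [pvSos]
      split
      · simp
      · intro h
        have := List.modifyHead_eq_nil_iff (l := pvSos s0 st rest) (f := (c :: ·))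
        rw [h] at this
        exact pvSos_ne_nil s0 st rest (this.mp rfl)

theorem modifyHead_id' {α : Type} (xs : List α) : xs.modifyHead (fun x => x) = xs := by
  cases xs <;> simp

theorem modifyHead_modifyHead' {α : Type} (f g : α → α) (xs : List α) :
    (xs.modifyHead g).modifyHead f = xs.modifyHead (fun x => f (g x)) := by
  cases xs <;> simp

theorem splitOn_go_spec (s0 : Char) (st : List Char) (fuel : Nat) :
    ∀ (l cur : List Char) (acc : List (List Char)), l.length ≤ fuel →
      PySem.Chars.splitOn.go (s0 :: st) fuel l cur acc =
        acc.reverse ++ (pvSos s0 st l).modifyHead (fun x => cur.reverse ++ x) := by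
  induction fuel with
  | zero =>
      intro l cur acc h
      have : l = [] := by cases l <;> simp_all
      subst this
      rw [PySem.Chars.splitOn.go.eq_def]
      simp [pvSos]
  | succ fuel ih =>
      intro l cur acc h
      cases l with
      | nil =>
          rw [PySem.Chars.splitOn.go.eq_def]
          simp [pvSos]
      | cons c rest =>
          rw [PySem.Chars.splitOn.go.eq_def]
          dsimp only
          by_cases hp : (s0 :: st).isPrefixOf (c :: rest) = true
          · rw [if_pos hp]
            rw [ih _ _ _ (by simp at h ⊢; omega)]
            rw [pvSos, if_pos hp]
            simp
            rw [modifyHead_id']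
          · rw [if_neg hp]
            rw [ih _ _ _ (by simp at h ⊢; omega)]
            rw [pvSos, if_neg hp]
            rw [modifyHead_modifyHead']
            simp

theorem splitOn_eq_pvSos (s0 : Char) (st l : List Char) :
    PySem.Chars.splitOn l (s0 :: st) = pvSos s0 st l := by
  unfold PySem.Chars.splitOn
  rw [splitOn_go_spec s0 st (l.length + 1) l [] [] (by omega)]
  simp
  rw [modifyHead_id']

theorem count_go_spec (s0 : Char) (st : List Char) (fuel : Nat) :
    ∀ (l : List Char) (acc : Nat), l.length ≤ fuel →
      PySem.Chars.count.go (s0 :: st) fuel l acc = acc + ((pvSos s0 st l).length - 1) := by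
  induction fuel with
  | zero =>
      intro l acc h
      have : l = [] := by cases l <;> simp_all
      subst this
      rw [PySem.Chars.count.go.eq_def]
      simp [pvSos]
  | succ fuel ih =>
      intro l acc h
      cases l with
      | nil =>
          rw [PySem.Chars.count.go.eq_def]
          simp [pvSos]
      | cons c rest =>
          rw [PySem.Chars.count.go.eq_def]
          dsimp only
          by_cases hp : (s0 :: st).isPrefixOf (c :: rest) = true
          · rw [if_pos hp]
            rw [ih _ _ (by simp at h ⊢; omega)]
            rw [pvSos, if_pos hp]
            have hpos : 0 < (pvSos s0 st (rest.drop st.length)).length :=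
              List.length_pos_iff.mpr (pvSos_ne_nil s0 st _)
            simp only [List.length_cons, List.drop_succ_cons]
            omega
          · rw [if_neg hp]
            rw [ih _ _ (by simp at h ⊢; omega)]
            rw [pvSos, if_neg hp]
            simp

theorem count_eq_pvSos (s0 : Char) (st l : List Char) :
    PySem.Chars.count l (s0 :: st) = (pvSos s0 st l).length - 1 := by
  unfold PySem.Chars.count
  rw [if_neg (by simp)]
  simpa using count_go_spec s0 st l.length l 0 (le_refl _)

theorem find_go_shift (sub : List Char) :
    ∀ (l : List Char), sub <:+: l → ∀ k : Nat,
      PySem.Chars.find.go sub l k = k + PySem.Chars.find.go sub l 0 := by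
  intro l
  induction l with
  | nil =>
      intro h k
      have : sub = [] := List.infix_nil.mp h
      subst this
      simp [PySem.Chars.find.go]
  | cons c rest ih =>
      intro h k
      rw [PySem.Chars.find.go.eq_def]
      conv_rhs => rw [PySem.Chars.find.go.eq_def]
      dsimp only
      by_cases hp : sub.isPrefixOf (c :: rest) = true
      · rw [if_pos hp, if_pos hp]
        simp
      · have hr : sub <:+: rest := by
          rcases List.infix_cons_iff.mp h with h1 | h1
          · exact absurd (List.isPrefixOf_iff_prefix.mpr h1) hp
          · exact h1
        rw [if_neg hp, if_neg hp]
        rw [ih hr (k + 1), ih hr 1]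
        push_cast
        ring

theorem find_of_prefix (sub l : List Char) (h : sub.isPrefixOf l = true) :
    PySem.Chars.find l sub = 0 := by
  cases l with
  | nil =>
      have : sub = [] := by simpa using List.isPrefixOf_iff_prefix.mp h
      subst this
      simp [PySem.Chars.find, PySem.Chars.find.go.eq_def]
  | cons c rest =>
      unfold PySem.Chars.find
      rw [PySem.Chars.find.go.eq_def]
      dsimp only
      rw [if_pos h]
      simp

theorem pvSos_split (s0 : Char) (st : List Char) :
    ∀ (l : List Char), (s0 :: st) <:+: l →
      pvSos s0 st l =
        l.take (PySem.Chars.find l (s0 :: st)).toNat ::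
          pvSos s0 st (l.drop ((PySem.Chars.find l (s0 :: st)).toNat + (st.length + 1))) := by
  intro l
  induction l with
  | nil =>
      intro h
      exact absurd (List.infix_nil.mp h) (by simp)
  | cons c rest ih =>
      intro h
      by_cases hp : (s0 :: st).isPrefixOf (c :: rest) = true
      · have hf : PySem.Chars.find (c :: rest) (s0 :: st) = 0 := find_of_prefix _ _ hp
        rw [pvSos, if_pos hp, hf]
        simp
      · have hr : (s0 :: st) <:+: rest := by
          rcases List.infix_cons_iff.mp h with h1 | h1
          · exact absurd (List.isPrefixOf_iff_prefix.mpr h1) hp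
          · exact h1
        have hnn : 0 ≤ PySem.Chars.find rest (s0 :: st) := (PySem.Chars.find_nonneg_iff _ _).mpr hr
        have h1 : PySem.Chars.find (c :: rest) (s0 :: st) =
            1 + PySem.Chars.find rest (s0 :: st) := by
          unfold PySem.Chars.find
          rw [PySem.Chars.find.go.eq_def]
          dsimp only
          rw [if_neg hp, find_go_shift (s0 :: st) rest hr 1]
          push_cast; ring
        have h2 : (PySem.Chars.find (c :: rest) (s0 :: st)).toNat =
            (PySem.Chars.find rest (s0 :: st)).toNat + 1 := by omega
        rw [pvSos, if_neg hp, ih hr, h2]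
        have h3 : (PySem.Chars.find rest (s0 :: st)).toNat + 1 + (st.length + 1) =
            ((PySem.Chars.find rest (s0 :: st)).toNat + (st.length + 1)) + 1 := by omega
        rw [h3]
        simp

theorem pvSos_not_infix (s0 : Char) (st : List Char) :
    ∀ (l : List Char), ¬ (s0 :: st) <:+: l → pvSos s0 st l = [l] := by
  intro l
  induction l with
  | nil => intro _; simp [pvSos]
  | cons c rest ih =>
      intro h
      have hp : ¬ (s0 :: st).isPrefixOf (c :: rest) = true := fun hp =>
        h (List.infix_cons_iff.mpr (Or.inl (List.isPrefixOf_iff_prefix.mp hp)))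
      have hr : ¬ (s0 :: st) <:+: rest := fun hr =>
        h (List.infix_cons_iff.mpr (Or.inr hr))
      rw [pvSos, if_neg hp, ih hr]
      simp

theorem pvInnerA_append (sep : List Char) :
    ∀ (n : Nat) (tmp : List Char) (b : List (List Char)),
      pvInnerA sep tmp n b = b ++ pvInnerA sep tmp n [] := by
  intro n
  induction n with
  | zero =>
      intro tmp b
      simp only [pvInnerA]
      split <;> simp
  | succ n ih =>
      intro tmp b
      simp only [pvInnerA]
      rw [ih]
      conv_rhs => rw [ih]
      split_ifs <;> simp

theorem foldl_burst_append (sep : List Char) :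
    ∀ (ps : List (List Char)) (b : List (List Char)),
      ps.foldl (fun out p => (out ++ [sep]) ++ (if p ≠ [] then [p] else [])) b =
        b ++ ps.foldl (fun out p => (out ++ [sep]) ++ (if p ≠ [] then [p] else [])) [] := by
  intro ps
  induction ps with
  | nil => intro b; simp
  | cons q qs ih =>
      intro b
      simp only [List.foldl_cons]
      rw [ih]
      conv_rhs => rw [ih]
      split_ifs <;> simp

theorem token_not_infix (s0 : Char) (st tmp : List Char) (h : ¬ (s0 :: st) <:+: tmp) :
    pvInnerA (s0 :: st) tmp (PySem.Chars.count tmp (s0 :: st)) [] = pvBurst (s0 :: st) tmp := by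
  have hc : PySem.Chars.count tmp (s0 :: st) = 0 := by
    rw [count_eq_pvSos, pvSos_not_infix s0 st tmp h]
    rfl
  rw [hc]
  simp only [pvBurst, splitOn_eq_pvSos, pvSos_not_infix s0 st tmp h]
  simp [pvInnerA]

theorem token_eq (s0 : Char) (st : List Char) :
    ∀ (m : Nat) (tmp : List Char), tmp.length ≤ m →
      pvInnerA (s0 :: st) tmp (PySem.Chars.count tmp (s0 :: st)) [] = pvBurst (s0 :: st) tmp := by
  intro m
  induction m with
  | zero =>
      intro tmp h
      have : tmp = [] := by cases tmp <;> simp_all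
      subst this
      exact token_not_infix s0 st [] (by simp)
  | succ m ih =>
      intro tmp h
      by_cases hinf : (s0 :: st) <:+: tmp
      · have htne : tmp ≠ [] := by
          intro he; subst he; simpa using List.infix_nil.mp hinf
        have hnn : 0 ≤ PySem.Chars.find tmp (s0 :: st) := (PySem.Chars.find_nonneg_iff _ _).mpr hinf
        have hsos := pvSos_split s0 st tmp hinf
        have hdlen : (tmp.drop ((PySem.Chars.find tmp (s0 :: st)).toNat + (st.length + 1))).length ≤ m := by
          have := List.length_drop (l := tmp)
            (i := (PySem.Chars.find tmp (s0 :: st)).toNat + (st.length + 1))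
          have h0 : 0 < tmp.length := List.length_pos_iff.mpr htne
          simp at h ⊢
          omega
        have hq := pvSos_ne_nil s0 st (tmp.drop ((PySem.Chars.find tmp (s0 :: st)).toNat + (st.length + 1)))
        have hc : PySem.Chars.count tmp (s0 :: st) =
            PySem.Chars.count (tmp.drop ((PySem.Chars.find tmp (s0 :: st)).toNat + (st.length + 1))) (s0 :: st) + 1 := by
          rw [count_eq_pvSos, count_eq_pvSos, hsos]
          have : 0 < (pvSos s0 st (tmp.drop ((PySem.Chars.find tmp (s0 :: st)).toNat + (st.length + 1)))).length :=
            List.length_pos_iff.mpr hq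
          simp only [List.length_cons]
          omega
        rw [hc]
        simp only [pvInnerA]
        have hpart : pvPartA (s0 :: st) tmp =
            (tmp.take (PySem.Chars.find tmp (s0 :: st)).toNat, s0 :: st,
             tmp.drop ((PySem.Chars.find tmp (s0 :: st)).toNat + (st.length + 1))) := by
          unfold pvPartA
          rw [if_neg (by omega)]
          simp
        rw [hpart]
        simp only
        rw [pvInnerA_append]
        rw [ih _ hdlen]
        -- right-hand side
        conv_rhs => rw [pvBurst]
        rw [splitOn_eq_pvSos, hsos]
        rcases hq' : pvSos s0 st (tmp.drop ((PySem.Chars.find tmp (s0 :: st)).toNat + (st.length + 1))) with _ | ⟨q, qs⟩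
        · exact absurd hq' hq
        · simp only [List.foldl_cons]
          rw [foldl_burst_append]
          have hb : pvBurst (s0 :: st) (tmp.drop ((PySem.Chars.find tmp (s0 :: st)).toNat + (st.length + 1))) =
              (if q ≠ [] then [q] else []) ++
                qs.foldl (fun out p => (out ++ [(s0 :: st)]) ++ (if p ≠ [] then [p] else [])) [] := by
            rw [pvBurst, splitOn_eq_pvSos, hq']
            dsimp only
            rw [foldl_burst_append]
          rw [hb]
          split_ifs <;> simp_all
      · exact token_not_infix s0 st tmp hinf

theorem step_eq (s0 : Char) (st : List Char) :
    ∀ (a b : List (List Char)),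
      a.foldl (fun b tmp => pvInnerA (s0 :: st) tmp (PySem.Chars.count tmp (s0 :: st)) b) b =
        b ++ a.flatMap (pvBurst (s0 :: st)) := by
  intro a
  induction a with
  | nil => intro b; simp
  | cons t ts ih =>
      intro b
      simp only [List.foldl_cons, List.flatMap_cons]
      rw [pvInnerA_append, token_eq s0 st t.length t (le_refl _), ih]
      simp

theorem foldl_seps_eq (separators : List String) (h : ∀ s ∈ separators, s ≠ "") :
    ∀ (a : List (List Char)),
      separators.foldl (fun a sep =>
          a.foldl (fun b tmp => pvInnerA sep.toList tmp (PySem.Chars.count tmp sep.toList) b) []) a =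
        separators.foldl (fun toks sep => toks.flatMap (pvBurst sep.toList)) a := by
  induction separators with
  | nil => intro a; rfl
  | cons s ss ih =>
      intro a
      have hs : s ≠ "" := h s (by simp)
      have hl : s.toList ≠ [] := by
        intro he
        exact hs (by
          have := congrArg String.ofList he
          simpa using this)
      simp only [List.foldl_cons]
      rcases hsl : s.toList with _ | ⟨s0, stl⟩
      · exact absurd hsl hl
      · rw [step_eq s0 stl a []]
        simp only [List.nil_append]
        exact ih (fun x hx => h x (by simp [hx])) _

-- reference for Chars.replace: leftmost non-overlapping replacement, structurally
def pvRep (s0 : Char) (st new : List Char) : List Char → List Char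
  | [] => []
  | c :: rest =>
      if (s0 :: st).isPrefixOf (c :: rest) then new ++ pvRep s0 st new (rest.drop st.length)
      else c :: pvRep s0 st new rest
  termination_by l => l.length
  decreasing_by
    all_goals simp

-- reference for Chars.split₀: whitespace tokenizer with pending token p
def pvTok : List Char → List Char → List (List Char)
  | p, [] => if p ≠ [] then [p] else []
  | p, c :: rest =>
      if PySem.Chars.isspace c then (if p ≠ [] then p :: pvTok [] rest else pvTok [] rest)
      else pvTok (p ++ [c]) rest

theorem replace_go_spec (s0 : Char) (st new : List Char) (fuel : Nat) :
    ∀ (l acc : List Char), l.length ≤ fuel →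
      PySem.Chars.replace.go (s0 :: st) new fuel l acc = acc.reverse ++ pvRep s0 st new l := by
  induction fuel with
  | zero =>
      intro l acc h
      have : l = [] := by cases l <;> simp_all
      subst this
      rw [PySem.Chars.replace.go.eq_def]
      simp [pvRep]
  | succ fuel ih =>
      intro l acc h
      cases l with
      | nil =>
          rw [PySem.Chars.replace.go.eq_def]
          simp [pvRep]
      | cons c rest =>
          rw [PySem.Chars.replace.go.eq_def]
          dsimp only
          by_cases hp : (s0 :: st).isPrefixOf (c :: rest) = true
          · rw [if_pos hp]
            rw [ih _ _ (by simp at h ⊢; omega)]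
            rw [pvRep, if_pos hp]
            simp
          · rw [if_neg hp]
            rw [ih _ _ (by simp at h ⊢; omega)]
            rw [pvRep, if_neg hp]
            simp

theorem replace_eq_pvRep (s0 : Char) (st new l : List Char) :
    PySem.Chars.replace l (s0 :: st) new = pvRep s0 st new l := by
  unfold PySem.Chars.replace
  rw [if_neg (by simp)]
  simpa using replace_go_spec s0 st new l.length l [] (le_refl _)

theorem pvRep_not_infix (s0 : Char) (st new : List Char) :
    ∀ (l : List Char), ¬ (s0 :: st) <:+: l → pvRep s0 st new l = l := by
  intro l
  induction l with
  | nil => intro _; simp [pvRep]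
  | cons c rest ih =>
      intro h
      have hp : ¬ (s0 :: st).isPrefixOf (c :: rest) = true := fun hp =>
        h (List.infix_cons_iff.mpr (Or.inl (List.isPrefixOf_iff_prefix.mp hp)))
      have hr : ¬ (s0 :: st) <:+: rest := fun hr =>
        h (List.infix_cons_iff.mpr (Or.inr hr))
      rw [pvRep, if_neg hp, ih hr]

theorem split0_go_spec :
    ∀ (l cur : List Char) (acc : List (List Char)),
      PySem.Chars.split₀.go l cur acc = acc.reverse ++ pvTok cur.reverse l := by
  intro l
  induction l with
  | nil =>
      intro cur acc
      rw [PySem.Chars.split₀.go.eq_def]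
      dsimp only
      rw [pvTok]
      by_cases hc : cur.isEmpty = true
      · rw [if_pos hc]
        have : cur = [] := by simpa using hc
        subst this
        simp
      · rw [if_neg hc]
        have : cur ≠ [] := by simpa using hc
        rw [if_pos (by simpa using this)]
        simp
  | cons c rest ih =>
      intro cur acc
      rw [PySem.Chars.split₀.go.eq_def]
      dsimp only
      rw [pvTok]
      by_cases hw : PySem.Chars.isspace c = true
      · rw [if_pos hw, if_pos hw]
        by_cases hc : cur.isEmpty = true
        · rw [if_pos hc]
          have : cur = [] := by simpa using hc
          subst this
          rw [ih]
          simp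
        · rw [if_neg hc]
          have hne : cur ≠ [] := by simpa using hc
          rw [if_pos (by simpa using hne), ih]
          simp
      · rw [if_neg hw, if_neg hw, ih]
        simp

theorem split0_eq_pvTok (l : List Char) : PySem.Chars.split₀ l = pvTok [] l := by
  unfold PySem.Chars.split₀
  rw [split0_go_spec]
  simp

theorem pvTok_ws (w : Char) (hw : PySem.Chars.isspace w = true) (p Y : List Char) :
    pvTok p (w :: Y) = (if p ≠ [] then [p] else []) ++ pvTok [] Y := by
  rw [pvTok, if_pos hw]
  split_ifs <;> simp

theorem pvTok_nonws (c : Char) (hc : PySem.Chars.isspace c = false) (p Y : List Char) :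
    pvTok p (c :: Y) = pvTok (p ++ [c]) Y := by
  rw [pvTok]
  simp [hc]

theorem pvTok_append (u : List Char) :
    ∀ (p v : List Char), (∀ c ∈ u, PySem.Chars.isspace c = false) →
      pvTok p (u ++ v) = pvTok (p ++ u) v := by
  induction u with
  | nil => intro p v _; simp
  | cons c u' ih =>
      intro p v hws
      have hc : PySem.Chars.isspace c = false := hws c (by simp)
      rw [List.cons_append, pvTok, if_neg (by simp [hc]), ih _ _ (fun x hx => hws x (by simp [hx]))]
      simp

theorem pvTok_ws_free :
    ∀ (l p : List Char), (∀ c ∈ p, PySem.Chars.isspace c = false) →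
      ∀ t ∈ pvTok p l, t ≠ [] ∧ ∀ c ∈ t, PySem.Chars.isspace c = false := by
  intro l
  induction l with
  | nil =>
      intro p hp t ht
      rw [pvTok] at ht
      split_ifs at ht with h
      · simp at ht
        subst ht
        exact ⟨h, hp⟩
      · simp at ht
  | cons c rest ih =>
      intro p hp t ht
      by_cases hw : PySem.Chars.isspace c = true
      · rw [pvTok_ws c hw] at ht
        rcases List.mem_append.mp ht with h1 | h1
        · split_ifs at h1 with h
          · simp at h1
            subst h1
            exact ⟨h, hp⟩
          · simp at h1
        · exact ih [] (by simp) t h1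
      · rw [pvTok, if_neg hw] at ht
        exact ih (p ++ [c]) (by
          intro x hx
          rcases List.mem_append.mp hx with h1 | h1
          · exact hp x h1
          · simp at h1; subst h1; simpa using hw) t ht

theorem pvTok_eq_nil_imp :
    ∀ (l p : List Char), pvTok p l = [] →
      (∀ c ∈ l, PySem.Chars.isspace c = true) ∧ p = [] := by
  intro l
  induction l with
  | nil =>
      intro p h
      rw [pvTok] at h
      split_ifs at h with hp <;> simp_all
  | cons c rest ih =>
      intro p h
      by_cases hw : PySem.Chars.isspace c = true
      · rw [pvTok_ws c hw] at h
        rcases List.append_eq_nil_iff.mp h with ⟨h1, h2⟩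
        have := ih [] h2
        constructor
        · intro x hx
          rcases List.mem_cons.mp hx with rfl | hx
          · exact hw
          · exact this.1 x hx
        · split_ifs at h1 with hp <;> simp_all
      · rw [pvTok, if_neg hw] at h
        have := ih (p ++ [c]) h
        simp at this

-- glued form of pvBurst's fold over the later pieces
def pvGlue (sep : List Char) : List (List Char) → List (List Char)
  | [] => []
  | q :: qs => ([sep] ++ (if q ≠ [] then [q] else [])) ++ pvGlue sep qs

theorem foldl_glue (sep : List Char) :
    ∀ (ps : List (List Char)),
      ps.foldl (fun out p => (out ++ [sep]) ++ (if p ≠ [] then [p] else [])) [] = pvGlue sep ps := by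
  intro ps
  induction ps with
  | nil => rfl
  | cons q qs ih =>
      simp only [List.foldl_cons]
      rw [foldl_burst_append, ih, pvGlue]
      simp

theorem pvBurst_pieces (s0 : Char) (st t p0 : List Char) (ps : List (List Char))
    (h : pvSos s0 st t = p0 :: ps) :
    pvBurst (s0 :: st) t = (if p0 ≠ [] then [p0] else []) ++ pvGlue (s0 :: st) ps := by
  rw [pvBurst, splitOn_eq_pvSos, h]
  dsimp only
  rw [foldl_burst_append, foldl_glue]

theorem pvBurst_nil (s0 : Char) (st : List Char) : pvBurst (s0 :: st) [] = [] := by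
  rw [pvBurst_pieces s0 st [] [] [] (by rw [pvSos])]
  simp [pvGlue]

theorem pvGlue_pvSos (s0 : Char) (st γ : List Char) :
    pvGlue (s0 :: st) (pvSos s0 st γ) = (s0 :: st) :: pvBurst (s0 :: st) γ := by
  rcases hγ : pvSos s0 st γ with _ | ⟨q, qs⟩
  · exact absurd hγ (pvSos_ne_nil s0 st γ)
  · rw [pvGlue, pvBurst_pieces s0 st γ q qs hγ]
    simp

theorem not_infix_of_inv (s0 : Char) (st p : List Char)
    (h : ∀ i < p.length, ¬ (s0 :: st).isPrefixOf (p.drop i) = true) :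
    ¬ (s0 :: st) <:+: p := by
  intro hin
  have hIn : PySem.Chars.isIn (s0 :: st) p = true := (PySem.Chars.isIn_iff_infix _ _).mpr hin
  obtain ⟨j, hj⟩ := (PySem.Chars.exists_prefix_drop_iff_isIn _ _).mpr hIn
  by_cases hjl : j < p.length
  · exact h j hjl (List.isPrefixOf_iff_prefix.mpr hj)
  · rw [List.drop_eq_nil_of_le (by omega)] at hj
    simpa using List.prefix_nil.mp hj

theorem pvSos_append_pending (s0 : Char) (st : List Char) :
    ∀ (p t : List Char),
      (∀ i < p.length, ¬ (s0 :: st).isPrefixOf (p.drop i ++ t) = true) →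
      pvSos s0 st (p ++ t) = (pvSos s0 st t).modifyHead (fun x => p ++ x) := by
  intro p
  induction p with
  | nil => intro t _; simp [modifyHead_id']
  | cons d p' ih =>
      intro t h
      have h0 : ¬ (s0 :: st).isPrefixOf (d :: (p' ++ t)) = true := by
        have := h 0 (by simp)
        simpa using this
      rw [List.cons_append, pvSos, if_neg h0,
          ih t (fun i hi => by have := h (i + 1) (by simp; omega); simpa using this),
          modifyHead_modifyHead']
      rfl

theorem pvSos_pend_sep (s0 : Char) (st p γ : List Char)
    (hinv : ∀ i < p.length, ¬ (s0 :: st).isPrefixOf (p.drop i ++ ((s0 :: st) ++ γ)) = true) :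
    pvSos s0 st (p ++ ((s0 :: st) ++ γ)) = p :: pvSos s0 st γ := by
  rw [pvSos_append_pending s0 st p _ hinv]
  have hmid : pvSos s0 st ((s0 :: st) ++ γ) = [] :: pvSos s0 st γ := by
    rw [List.cons_append, pvSos,
        if_pos (List.isPrefixOf_iff_prefix.mpr ⟨γ, by simp⟩)]
    rw [List.drop_left]
  rw [hmid]
  simp

theorem pvBurst_pend (s0 : Char) (st p γ : List Char)
    (hinv : ∀ i < p.length, ¬ (s0 :: st).isPrefixOf (p.drop i ++ ((s0 :: st) ++ γ)) = true) :
    pvBurst (s0 :: st) (p ++ ((s0 :: st) ++ γ)) =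
      (if p ≠ [] then [p] else []) ++ (s0 :: st) :: pvBurst (s0 :: st) γ := by
  rw [pvBurst_pieces s0 st _ p (pvSos s0 st γ) (pvSos_pend_sep s0 st p γ hinv),
      pvGlue_pvSos]

theorem flatMap_burst_id (sep : List Char) :
    ∀ (a : List (List Char)), (∀ t ∈ a, pvBurst sep t = [t]) → a.flatMap (pvBurst sep) = a := by
  intro a
  induction a with
  | nil => intro _; rfl
  | cons t ts ih =>
      intro h
      rw [List.flatMap_cons, h t (by simp), ih (fun x hx => h x (by simp [hx]))]
      rfl

theorem pvH (s0 : Char) (st : List Char) :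
    ∀ (v γ p : List Char),
      (∀ i < p.length, ¬ (s0 :: st).isPrefixOf ((p.drop i ++ ((s0 :: st) ++ γ)) ++ v) = true) →
      (pvTok (p ++ ((s0 :: st) ++ γ)) v).flatMap (pvBurst (s0 :: st)) =
        (if p ≠ [] then [p] else []) ++ (s0 :: st) :: (pvTok γ v).flatMap (pvBurst (s0 :: st)) := by
  intro v
  induction v with
  | nil =>
      intro γ p hinv
      rw [pvTok, if_pos (by simp), pvTok]
      rw [List.flatMap_cons, List.flatMap_nil, List.append_nil]
      rw [pvBurst_pend s0 st p γ (fun i hi => by have := hinv i hi; simpa using this)]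
      by_cases hγ : γ = []
      · subst hγ; simp [pvBurst_nil]
      · rw [if_pos hγ]
        simp
  | cons w v' ih =>
      intro γ p hinv
      by_cases hw : PySem.Chars.isspace w = true
      · rw [pvTok_ws w hw, pvTok_ws w hw]
        rw [List.flatMap_append, List.flatMap_append]
        rw [if_pos (show p ++ ((s0 :: st) ++ γ) ≠ [] by simp)]
        rw [List.flatMap_cons, List.flatMap_nil, List.append_nil]
        rw [pvBurst_pend s0 st p γ (fun i hi => by
          intro hpre
          exact hinv i hi (List.isPrefixOf_iff_prefix.mpr
            ((List.isPrefixOf_iff_prefix.mp hpre).trans (List.prefix_append _ _))))]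
        by_cases hγ : γ = []
        · subst hγ; simp [pvBurst_nil]
        · rw [if_pos hγ]
          rw [List.flatMap_cons, List.flatMap_nil, List.append_nil]
          simp
      · have hw' : PySem.Chars.isspace w = false := by simpa using hw
        rw [pvTok_nonws w hw', pvTok_nonws w hw']
        have hassoc : (p ++ ((s0 :: st) ++ γ)) ++ [w] = p ++ ((s0 :: st) ++ (γ ++ [w])) := by simp
        rw [hassoc, ih (γ ++ [w]) p (fun i hi => by
          have := hinv i hi
          simpa using this)]

theorem burst_eq_self_of_inv (s0 : Char) (st p : List Char) (hp : p ≠ [])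
    (hinv : ∀ i < p.length, ¬ (s0 :: st).isPrefixOf (p.drop i) = true) :
    pvBurst (s0 :: st) p = [p] := by
  rw [pvBurst_pieces s0 st p p [] (pvSos_not_infix s0 st p (not_infix_of_inv s0 st p hinv))]
  rw [if_pos hp]
  rfl

theorem pvG (s0 : Char) (st : List Char)
    (hws : ∀ c ∈ (s0 :: st), PySem.Chars.isspace c = false) :
    ∀ (m : Nat) (l p : List Char), l.length ≤ m →
      (∀ i < p.length, ¬ (s0 :: st).isPrefixOf (p.drop i ++ l) = true) →
      pvTok p (pvRep s0 st (' ' :: ((s0 :: st) ++ [' '])) l) =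
        (pvTok p l).flatMap (pvBurst (s0 :: st)) := by
  intro m
  induction m with
  | zero =>
      intro l p h hinv
      have : l = [] := by cases l <;> simp_all
      subst this
      rw [pvRep]
      have hTok : pvTok p [] = if p ≠ [] then [p] else [] := by rw [pvTok]
      rw [hTok]
      split_ifs with hp
      · rw [List.flatMap_cons, List.flatMap_nil, List.append_nil,
            burst_eq_self_of_inv s0 st p hp (fun i hi => by have := hinv i hi; simpa using this)]
      · rfl
  | succ m ih =>
      intro l p h hinv
      cases l with
      | nil =>
          rw [pvRep]
          have hTok : pvTok p [] = if p ≠ [] then [p] else [] := by rw [pvTok]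
          rw [hTok]
          split_ifs with hp
          · rw [List.flatMap_cons, List.flatMap_nil, List.append_nil,
                burst_eq_self_of_inv s0 st p hp (fun i hi => by have := hinv i hi; simpa using this)]
          · rfl
      | cons c rest =>
          by_cases hp : (s0 :: st).isPrefixOf (c :: rest) = true
          · -- l = sep ++ u : the pass emits ' sep ' and continues after the occurrence
            obtain ⟨u, hu⟩ := List.isPrefixOf_iff_prefix.mp hp
            have hul : u.length ≤ m := by
              have := congrArg List.length hu
              simp at this h
              omega
            have hrest : rest.drop st.length = u := by
              have h2 : st ++ u = rest := by
                have := hu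
                simp [List.cons_append] at this
                exact this.2
              rw [← h2, List.drop_left]
            have hL : pvTok p (pvRep s0 st (' ' :: ((s0 :: st) ++ [' '])) (c :: rest)) =
                (if p ≠ [] then [p] else []) ++
                  ([s0 :: st] ++ pvTok [] (pvRep s0 st (' ' :: ((s0 :: st) ++ [' '])) u)) := by
              rw [pvRep, if_pos hp, hrest]
              have hshape : (' ' :: ((s0 :: st) ++ [' '])) ++ pvRep s0 st (' ' :: ((s0 :: st) ++ [' '])) u =
                  ' ' :: ((s0 :: st) ++ (' ' :: pvRep s0 st (' ' :: ((s0 :: st) ++ [' '])) u)) := by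
                simp
              rw [hshape, pvTok_ws ' ' (by decide)]
              congr 1
              rw [pvTok_append (s0 :: st) [] _ hws, List.nil_append, pvTok_ws ' ' (by decide),
                  if_pos (show (s0 :: st) ≠ [] by simp)]
            rw [hL, ih u [] hul (by simp)]
            rw [← hu, pvTok_append (s0 :: st) p u hws]
            have hH := pvH s0 st u [] p (fun i hi => by
              have := hinv i hi
              rw [← hu] at this
              simpa using this)
            simp only [List.append_nil] at hH
            rw [hH]
            simp
          · rw [pvRep, if_neg hp]
            by_cases hw : PySem.Chars.isspace c = true
            · rw [pvTok_ws c hw, pvTok_ws c hw]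
              rw [List.flatMap_append]
              rw [ih rest [] (by simp at h; omega) (by simp)]
              congr 1
              split_ifs with hpe
              · rw [List.flatMap_cons, List.flatMap_nil, List.append_nil,
                    burst_eq_self_of_inv s0 st p hpe (fun i hi => by
                      intro hpre
                      exact hinv i hi (List.isPrefixOf_iff_prefix.mpr
                        ((List.isPrefixOf_iff_prefix.mp hpre).trans (List.prefix_append _ _))))]
              · rfl
            · have hw' : PySem.Chars.isspace c = false := by simpa using hw
              rw [pvTok_nonws c hw', pvTok_nonws c hw']
              rw [ih rest (p ++ [c]) (by simp at h; omega) (fun i hi => by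
                simp at hi
                rcases Nat.lt_or_ge i p.length with hil | hil
                · rw [List.drop_append_of_le_length (by omega)]
                  have := hinv i hil
                  simpa using this
                · have hieq : i = p.length := by omega
                  subst hieq
                  rw [List.drop_append_of_le_length (by omega)]
                  simpa using hp)]

-- separators containing whitespace (or empty after the guard) leave a whitespace-free
-- token list unchanged on A's side
theorem pass_id_of_ws (sep : List Char) (c0 : Char) (hc0 : c0 ∈ sep)
    (hw : PySem.Chars.isspace c0 = true) (a : List (List Char))
    (ha : ∀ t ∈ a, t ≠ [] ∧ ∀ c ∈ t, PySem.Chars.isspace c = false) :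
    a.flatMap (pvBurst sep) = a := by
  apply flatMap_burst_id
  intro t ht
  rcases sep with _ | ⟨s0, st⟩
  · simp at hc0
  · have hni : ¬ (s0 :: st) <:+: t := by
      intro hin
      have : c0 ∈ t := hin.sublist.subset hc0
      have := (ha t ht).2 c0 this
      simp_all
    rw [pvBurst_pieces s0 st t t [] (pvSos_not_infix s0 st t hni), if_pos (ha t ht).1]
    rfl

theorem fold_blank (l : List Char) (hblank : ∀ c ∈ l, PySem.Chars.isspace c = true) :
    ∀ (seps : List String),
      seps.foldl (fun s sep =>
        if sep.toList ≠ [] ∧ sep.toList.any PySem.Chars.isspace = false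
        then PySem.Chars.replace s sep.toList (' ' :: (sep.toList ++ [' ']))
        else s) l = l := by
  intro seps
  induction seps with
  | nil => rfl
  | cons x xs ih =>
      simp only [List.foldl_cons]
      by_cases hg : x.toList ≠ [] ∧ x.toList.any PySem.Chars.isspace = false
      · rw [if_pos hg]
        rcases hx : x.toList with _ | ⟨s0, st⟩
        · exact absurd hx hg.1
        · rw [replace_eq_pvRep, pvRep_not_infix s0 st _ l (by
            intro hin
            have hmem : s0 ∈ l := hin.sublist.subset (by simp)
            have h1 := hblank s0 hmem
            have h2 : PySem.Chars.isspace s0 = false := by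
              have := hg.2
              rw [hx] at this
              simpa using (List.any_eq_false.mp this s0 (by simp))
            simp_all)]
          exact ih
      · rw [if_neg hg]
        exact ih

theorem foldB_eq (seps : List String) (hne : ∀ x ∈ seps, x ≠ "") :
    ∀ (s : List Char),
      PySem.Chars.split₀ (seps.foldl (fun s sep =>
          if sep.toList ≠ [] ∧ sep.toList.any PySem.Chars.isspace = false
          then PySem.Chars.replace s sep.toList (' ' :: (sep.toList ++ [' ']))
          else s) s) =
        seps.foldl (fun toks sep => toks.flatMap (pvBurst sep.toList)) (PySem.Chars.split₀ s) := by
  induction seps with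
  | nil => intro s; rfl
  | cons x xs ih =>
      intro s
      simp only [List.foldl_cons]
      by_cases hg : x.toList ≠ [] ∧ x.toList.any PySem.Chars.isspace = false
      · rw [if_pos hg]
        rcases hx : x.toList with _ | ⟨s0, st⟩
        · exact absurd hx hg.1
        · have hws : ∀ c ∈ (s0 :: st), PySem.Chars.isspace c = false := by
            intro c hc
            have := hg.2
            rw [hx] at this
            simpa using List.any_eq_false.mp this c hc
          have hstep : PySem.Chars.split₀ (PySem.Chars.replace s (s0 :: st) (' ' :: ((s0 :: st) ++ [' ']))) =
              (PySem.Chars.split₀ s).flatMap (pvBurst (s0 :: st)) := by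
            rw [replace_eq_pvRep, split0_eq_pvTok, split0_eq_pvTok]
            exact pvG s0 st hws s.length s [] (le_refl _) (by simp)
          rw [← hstep]
          exact ih (fun y hy => hne y (by simp [hy])) _
      · rw [if_neg hg]
        have hxne : x.toList ≠ [] := by
          intro he
          exact hne x (by simp) (by
            have := congrArg String.ofList he
            simpa using this)
        have hany : x.toList.any PySem.Chars.isspace = true := by
          rcases Bool.eq_false_or_eq_true (x.toList.any PySem.Chars.isspace) with h1 | h1
          · exact h1
          · exact absurd ⟨hxne, h1⟩ hg
        obtain ⟨c0, hc0, hcw⟩ := List.any_eq_true.mp hany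
        have hid : (PySem.Chars.split₀ s).flatMap (pvBurst x.toList) = PySem.Chars.split₀ s := by
          apply pass_id_of_ws x.toList c0 hc0 hcw
          intro t ht
          rw [split0_eq_pvTok] at ht
          exact pvTok_ws_free s [] (by simp) t ht
        rw [hid]
        exact ih (fun y hy => hne y (by simp [hy])) _

-- ===== VERDICT (by name: the statement is the Claim_ definition above) =====
theorem line2strlist_spec : Claim_equal_line2strlist := by
  intro l separators _ hpre
  unfold Spec_line2strlist line2strlist line2strlist_alt
  simp only
  by_cases ha : PySem.Chars.split₀ l.toList = []
  · rw [if_pos ha]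
    have hblank : ∀ c ∈ l.toList, PySem.Chars.isspace c = true := by
      have hnil : pvTok [] l.toList = [] := by rw [← split0_eq_pvTok]; exact ha
      exact (pvTok_eq_nil_imp l.toList [] hnil).1
    rw [fold_blank l.toList hblank separators, ha]
    rfl
  · rw [if_neg ha]
    have hp : ∀ s ∈ separators, s ≠ "" := by
      apply hpre
      intro he
      exact ha (by rw [← PySem.Str.split₀_map_toList, he]; rfl)
    rw [foldl_seps_eq separators hp, foldB_eq separators hp l.toList]
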